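-- pv_equiv track=rewrite | github.com/leepolla/LawnVision | Coloring.py | makeCoordinates
-- ===== SOURCE A (Python) =====
-- def makeCoordinates(geometryPoints):
--     geometry = []
--     for geoPoint in geometryPoints:
--         geometry.append(str(geoPoint[1]))
--         geometry.append(str(geoPoint[0]))
--     name = ""
--     swap = True
--     for x in geometry:
--         if(swap):
--             name = name + "%7C"+ x
--             swap = False
--         else:
--             name = name + "%2C" + x
--             swap = True
--     return name
-- ===== SOURCE B (Python) =====
-- def makeCoordinates(geometryPoints):
--     return "".join("%7C" + str(p[1]) + "%2C" + str(p[0]) for p in geometryPoints)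
-- ===== Notes on version B (the rewrite author's own statement) =====
-- stated objective: simpler
-- what changed: Replaces the flattened intermediate list and the swap-flag accumulation loop with a single pass that joins one '%7C<y>%2C<x>' chunk per point.
import Mathlib
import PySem

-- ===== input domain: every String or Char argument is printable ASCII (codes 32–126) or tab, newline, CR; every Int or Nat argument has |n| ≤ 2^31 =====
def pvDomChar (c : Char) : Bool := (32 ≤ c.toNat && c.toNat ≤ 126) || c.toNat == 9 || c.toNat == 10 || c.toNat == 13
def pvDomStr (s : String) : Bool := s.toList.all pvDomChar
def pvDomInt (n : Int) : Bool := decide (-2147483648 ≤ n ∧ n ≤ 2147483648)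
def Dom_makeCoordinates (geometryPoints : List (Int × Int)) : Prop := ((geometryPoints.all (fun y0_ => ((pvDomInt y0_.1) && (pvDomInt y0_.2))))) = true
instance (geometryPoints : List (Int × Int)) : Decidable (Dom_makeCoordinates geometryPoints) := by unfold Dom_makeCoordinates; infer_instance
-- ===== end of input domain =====

-- B replaces A's intermediate flat list and swap-flag loop by joining one chunk per point (objective: simpler).

-- ===== PORT A =====
-- second loop of A: fold over the flat string list with the swap flag
def makeCoordinatesLoop : String → Bool → List String → String
  | name, _, [] => name
  | name, swap, x :: rest =>
      if swap then makeCoordinatesLoop (name ++ "%7C" ++ x) false rest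
      else makeCoordinatesLoop (name ++ "%2C" ++ x) true rest

def makeCoordinates (geometryPoints : List (Int × Int)) : String :=
  let geometry := geometryPoints.foldl
    (fun g p => g ++ [PySem.Int.toStr p.2, PySem.Int.toStr p.1]) []
  makeCoordinatesLoop "" true geometry

-- ===== PORT B =====
def makeCoordinates_alt (geometryPoints : List (Int × Int)) : String :=
  String.join (geometryPoints.map
    (fun p => "%7C" ++ PySem.Int.toStr p.2 ++ "%2C" ++ PySem.Int.toStr p.1))

-- ===== PRECONDITION & SPEC =====
def Spec_makeCoordinates (geometryPoints : List (Int × Int)) (out : String) : Prop := out = makeCoordinates_alt geometryPoints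
instance (geometryPoints : List (Int × Int)) (out : String) : Decidable (Spec_makeCoordinates geometryPoints out) := by unfold Spec_makeCoordinates; infer_instance

-- ===== CLAIM (what is proved, stated in full; the proofs are below) =====
def Claim_equal_makeCoordinates : Prop := ∀ (geometryPoints : List (Int × Int)), Dom_makeCoordinates geometryPoints → Spec_makeCoordinates geometryPoints (makeCoordinates geometryPoints)

-- ===== LEMMAS AND PROOFS =====

-- A's first loop builds the flatMap of the per-point pairs
theorem makeCoordinates_flat (gps : List (Int × Int)) (acc : List String) :
    gps.foldl (fun g p => g ++ [PySem.Int.toStr p.2, PySem.Int.toStr p.1]) acc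
      = acc ++ gps.flatMap (fun p => [PySem.Int.toStr p.2, PySem.Int.toStr p.1]) := by
  induction gps generalizing acc with
  | nil => simp
  | cons p rest ih => simp [List.foldl, ih, List.flatMap_cons]

-- String.join peels one chunk
theorem joinStr_foldl (s : String) (l : List String) :
    l.foldl (· ++ ·) s = s ++ l.foldl (· ++ ·) "" := by
  induction l generalizing s with
  | nil => simp
  | cons c cs ih =>
      rw [List.foldl_cons, List.foldl_cons, ih, ih (s := "" ++ c)]
      simp [String.append_assoc]

theorem joinStr_cons (c : String) (cs : List String) :
    String.join (c :: cs) = c ++ String.join cs := by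
  show List.foldl (· ++ ·) ("" ++ c) cs = c ++ List.foldl (· ++ ·) "" cs
  rw [joinStr_foldl]
  simp

-- A's swap loop, started with swap = true on an even-shaped (pairwise) list, appends the joined chunks
theorem makeCoordinatesLoop_join (gps : List (Int × Int)) (name : String) :
    makeCoordinatesLoop name true
        (gps.flatMap (fun p => [PySem.Int.toStr p.2, PySem.Int.toStr p.1]))
      = name ++ String.join (gps.map
          (fun p => "%7C" ++ PySem.Int.toStr p.2 ++ "%2C" ++ PySem.Int.toStr p.1)) := by
  induction gps generalizing name with
  | nil => simp [makeCoordinatesLoop, String.join]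
  | cons p rest ih =>
      rw [List.flatMap_cons]
      show makeCoordinatesLoop (name ++ "%7C" ++ PySem.Int.toStr p.2 ++ "%2C" ++ PySem.Int.toStr p.1) true _ = _
      rw [show ([] : List String).append (List.flatMap (fun p => [PySem.Int.toStr p.2, PySem.Int.toStr p.1]) rest) = List.flatMap (fun p => [PySem.Int.toStr p.2, PySem.Int.toStr p.1]) rest from rfl]
      rw [ih, List.map_cons, joinStr_cons]
      simp [String.append_assoc]

-- ===== VERDICT (by name: the statement is the Claim_ definition above) =====
theorem makeCoordinates_spec : Claim_equal_makeCoordinates := by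
  intro gps _
  unfold Spec_makeCoordinates makeCoordinates makeCoordinates_alt
  rw [makeCoordinates_flat, List.nil_append, makeCoordinatesLoop_join]
  simp
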